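-- pv_equiv track=rewrite | github.com/MichinoriShimoji/eaf2json | eaf2json.py | compute_ids
-- ===== SOURCE A (Python) =====
-- def compute_ids(separators):
--     """
--     separators リストから extw_id と w_id を計算する。
--
--     extw_id: スペース区切りでインクリメント
--     w_id   : スペース・= 区切りでインクリメント
--     """
--     extw_ids = []
--     w_ids = []
--     ew = 0
--     w = 0
--     for i, sep in enumerate(separators):
--         if i == 0:
--             pass  # 初期値のまま
--         elif sep == 'S':
--             ew += 1
--             w += 1
--         elif sep == '=':
--             w += 1
--         elif sep == '-':
--             pass  # 同一語内
--         elif sep == '':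
--             pass  # 直結（句読点など）
--         extw_ids.append(ew)
--         w_ids.append(w)
--
--     return extw_ids, w_ids
-- ===== SOURCE B (Python) =====
-- def _increments(separators, bump):
--     return [0 if i == 0 else (1 if bump(sep) else 0)
--             for i, sep in enumerate(separators)]
--
--
-- def _accumulate(incs):
--     out = []
--     total = 0
--     for x in incs:
--         total += x
--         out.append(total)
--     return out
--
--
-- def compute_ids(separators):
--     ew_inc = _increments(separators, lambda sep: sep == 'S')
--     w_inc = _increments(separators, lambda sep: sep in ('S', '='))
--     return _accumulate(ew_inc), _accumulate(w_inc)
-- ===== Notes on version B (the rewrite author's own statement) =====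
-- stated objective: alternative
-- what changed: Replaces A's single fused loop mutating two counters and appending to two lists by a two-stage pipeline: build per-position increment tables (0/1) with enumerate, then prefix-sum each table into the result lists.
import Mathlib
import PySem

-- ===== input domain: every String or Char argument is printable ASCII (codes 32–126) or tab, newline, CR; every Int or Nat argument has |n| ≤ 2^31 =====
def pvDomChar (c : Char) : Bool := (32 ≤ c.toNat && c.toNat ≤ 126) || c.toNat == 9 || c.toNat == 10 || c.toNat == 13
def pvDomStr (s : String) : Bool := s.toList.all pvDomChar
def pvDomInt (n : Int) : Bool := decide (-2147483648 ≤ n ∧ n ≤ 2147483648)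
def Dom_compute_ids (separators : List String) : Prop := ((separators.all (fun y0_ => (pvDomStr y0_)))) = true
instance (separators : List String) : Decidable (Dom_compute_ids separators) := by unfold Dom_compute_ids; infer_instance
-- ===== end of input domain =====

-- B replaces A's fused counter-mutating loop by an increment-table + prefix-sum pipeline (alternative decomposition, same cost).


-- ===== PORT A =====
-- the body of A's for-loop, step for step (branch order preserved)
def computeIdsStep (s : List Int × List Int × Int × Int) (p : Int × String) :
    List Int × List Int × Int × Int :=
  let extw_ids := s.1
  let w_ids := s.2.1
  let ew := s.2.2.1
  let w := s.2.2.2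
  let c :=
    if p.1 == 0 then (ew, w)
    else if p.2 == "S" then (ew + 1, w + 1)
    else if p.2 == "=" then (ew, w + 1)
    else if p.2 == "-" then (ew, w)
    else if p.2 == "" then (ew, w)
    else (ew, w)
  (extw_ids ++ [c.1], w_ids ++ [c.2], c.1, c.2)

def compute_ids (separators : List String) : List Int × List Int :=
  let st := (PySem.List.enumerate separators).foldl computeIdsStep ([], [], 0, 0)
  (st.1, st.2.1)

-- ===== PORT B =====
def pvIncrements (separators : List String) (bump : String → Bool) : List Int :=
  (PySem.List.enumerate separators).map
    (fun p => if p.1 == 0 then (0 : Int) else if bump p.2 then 1 else 0)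

def pvAccumulate (incs : List Int) : List Int :=
  (incs.foldl (fun (s : List Int × Int) x => (s.1 ++ [s.2 + x], s.2 + x)) ([], 0)).1

def compute_ids_alt (separators : List String) : List Int × List Int :=
  let ew_inc := pvIncrements separators (fun sep => sep == "S")
  let w_inc := pvIncrements separators (fun sep => sep == "S" || sep == "=")
  (pvAccumulate ew_inc, pvAccumulate w_inc)

-- ===== PRECONDITION & SPEC =====
def Spec_compute_ids (separators : List String) (out : List Int × List Int) : Prop := out = compute_ids_alt separators
instance (separators : List String) (out : List Int × List Int) : Decidable (Spec_compute_ids separators out) := by unfold Spec_compute_ids; infer_instance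

-- ===== CLAIM (what is proved, stated in full; the proofs are below) =====
def Claim_equal_compute_ids : Prop := ∀ (separators : List String), Dom_compute_ids separators → Spec_compute_ids separators (compute_ids separators)

-- ===== LEMMAS AND PROOFS =====

-- prefix sums starting from a running total t (proof-only helper)
def pvAccFrom (t : Int) : List Int → List Int
  | [] => []
  | x :: xs => (t + x) :: pvAccFrom (t + x) xs

theorem pvAccumulate_foldl (incs : List Int) :
    ∀ (out : List Int) (t : Int),
      incs.foldl (fun (s : List Int × Int) x => (s.1 ++ [s.2 + x], s.2 + x)) (out, t)
        = (out ++ pvAccFrom t incs, t + incs.sum) := by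
  induction incs with
  | nil => intro out t; simp [pvAccFrom]
  | cons x xs ih =>
      intro out t
      simp only [List.foldl_cons, ih, pvAccFrom, List.sum_cons, Prod.mk.injEq]
      exact ⟨by simp, by ring⟩

theorem pvAccumulate_eq (incs : List Int) : pvAccumulate incs = pvAccFrom 0 incs := by
  simp [pvAccumulate, pvAccumulate_foldl]

theorem pvIncrements_tail (bump : String → Bool) (xs : List String) :
    ∀ (k : Int), 0 < k →
      (PySem.List.enumerate xs k).map
          (fun p => if p.1 == 0 then (0 : Int) else if bump p.2 then 1 else 0)
        = xs.map (fun s => if bump s then (1 : Int) else 0) := by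
  induction xs with
  | nil => intro k _; simp [PySem.List.enumerate_nil]
  | cons x xs ih =>
      intro k hk
      have hk0 : (k == 0) = false := by simp; omega
      simp only [PySem.List.enumerate_cons, List.map_cons, hk0, Bool.false_eq_true, if_false]
      rw [ih (k + 1) (by omega)]

theorem compute_ids_fold_tail (xs : List String) :
    ∀ (k : Int), 0 < k → ∀ (es ws : List Int) (ew w : Int),
      (PySem.List.enumerate xs k).foldl computeIdsStep (es, ws, ew, w)
      = (es ++ pvAccFrom ew (xs.map (fun s => if s == "S" then (1 : Int) else 0)),
         ws ++ pvAccFrom w (xs.map (fun s => if s == "S" || s == "=" then (1 : Int) else 0)),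
         ew + (xs.map (fun s => if s == "S" then (1 : Int) else 0)).sum,
         w + (xs.map (fun s => if s == "S" || s == "=" then (1 : Int) else 0)).sum) := by
  induction xs with
  | nil => intro k _ es ws ew w; simp [PySem.List.enumerate_nil, pvAccFrom]
  | cons x xs ih =>
      intro k hk es ws ew w
      have hk0 : (k == 0) = false := by simp; omega
      have hstep : computeIdsStep (es, ws, ew, w) (k, x)
          = (es ++ [ew + (if x == "S" then 1 else 0)],
             ws ++ [w + (if x == "S" || x == "=" then 1 else 0)],
             ew + (if x == "S" then 1 else 0),
             w + (if x == "S" || x == "=" then 1 else 0)) := by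
        simp only [computeIdsStep, hk0, Bool.false_eq_true, if_false]
        by_cases hS : x = "S" <;> by_cases hE : x = "=" <;>
          simp [hS, hE]
      simp only [PySem.List.enumerate_cons, List.foldl_cons, hstep]
      rw [ih (k + 1) (by omega)]
      simp only [List.map_cons, pvAccFrom, List.sum_cons, Prod.mk.injEq]
      refine ⟨by simp, by simp, by ring, by ring⟩

-- ===== VERDICT (by name: the statement is the Claim_ definition above) =====
theorem compute_ids_spec : Claim_equal_compute_ids := by
  intro separators _
  unfold Spec_compute_ids compute_ids compute_ids_alt pvIncrements
  cases separators with
  | nil => simp [PySem.List.enumerate_nil, pvAccumulate]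
  | cons x xs =>
      have hstep0 : computeIdsStep ([], [], 0, 0) ((0 : Int), x) = ([0], [0], 0, 0) := by
        simp [computeIdsStep]
      simp only [PySem.List.enumerate_cons, List.foldl_cons, List.map_cons, hstep0]
      have h01 : (0 : Int) + 1 = 1 := by norm_num
      rw [h01]
      rw [compute_ids_fold_tail xs 1 (by norm_num),
          pvIncrements_tail (fun sep => sep == "S") xs 1 (by norm_num),
          pvIncrements_tail (fun sep => sep == "S" || sep == "=") xs 1 (by norm_num),
          pvAccumulate_eq, pvAccumulate_eq]
      simp [pvAccFrom]
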